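-- pv_equiv track=rewrite | github.com/Din0zaBr/DSTU | Cryptography/first_lab/sixth.py | decrypt_2
-- ===== SOURCE A (Python) =====
-- def decrypt_2(encrypted_table, table):
--     n = len(table[0])
--     phrase = ""
--     stop = 1
--     while stop != n * n + 1:
--         for i in range(n):
--             for j in range(n):
--                 if table[i][j] == stop:
--                     phrase += encrypted_table[i][j]
--         stop += 1
--
--     return phrase
-- ===== SOURCE B (Python) =====
-- def decrypt_2(encrypted_table, table):
--     n = len(table[0])
--     limit = n * n
--     buckets = {}
--     for i in range(n):
--         for j in range(n):
--             v = table[i][j]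
--             if 1 <= v <= limit:
--                 buckets[v] = buckets.get(v, []) + [encrypted_table[i][j]]
--     return "".join("".join(buckets.get(v, [])) for v in range(1, limit + 1))
-- ===== Notes on version B (the rewrite author's own statement) =====
-- stated objective: faster
-- what changed: One pass over the grid grouping cells into a dict keyed by their number (values outside 1..n*n skipped), then one pass over 1..n*n joining the buckets, instead of rescanning the whole grid once per number.
import Mathlib
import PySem

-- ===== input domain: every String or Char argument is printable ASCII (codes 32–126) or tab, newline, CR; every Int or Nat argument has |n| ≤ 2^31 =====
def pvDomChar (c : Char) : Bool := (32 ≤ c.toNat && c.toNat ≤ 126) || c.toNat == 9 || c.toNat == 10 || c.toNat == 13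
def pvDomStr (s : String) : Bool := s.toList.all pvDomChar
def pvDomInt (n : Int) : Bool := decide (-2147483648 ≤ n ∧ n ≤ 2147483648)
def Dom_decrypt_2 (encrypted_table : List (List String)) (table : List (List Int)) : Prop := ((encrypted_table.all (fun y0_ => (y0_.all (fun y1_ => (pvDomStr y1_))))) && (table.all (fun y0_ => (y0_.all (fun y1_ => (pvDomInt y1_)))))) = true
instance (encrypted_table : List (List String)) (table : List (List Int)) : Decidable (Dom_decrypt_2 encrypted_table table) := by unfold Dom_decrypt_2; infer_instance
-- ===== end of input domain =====

-- B replaces A's one-full-grid-scan-per-number loop (O(n^4)) by a single grid pass that groups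
-- cells into a dict of buckets keyed by their number, then joins the buckets for 1..n*n (O(n^2)).

-- ===== PORT A =====
-- literal port of A: while stop != n*n+1 is the for-loop over range(1, n*n+1);
-- strings are handled as List Char (PySem convention); indexing via pyGetD (in range under Pre_).
def decrypt_2 (encrypted_table : List (List String)) (table : List (List Int)) : String :=
  let n : Int := PySem.List.len (PySem.List.pyGetD table 0 [])
  let phrase : List Char :=
    (PySem.List.pyRange 1 (n * n + 1) 1).foldl (fun phrase stop =>
      (PySem.List.pyRange 0 n 1).foldl (fun phrase i =>
        (PySem.List.pyRange 0 n 1).foldl (fun phrase j =>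
          if PySem.List.pyGetD (PySem.List.pyGetD table i []) j 0 = stop then
            phrase ++ (PySem.List.pyGetD (PySem.List.pyGetD encrypted_table i []) j "").toList
          else phrase) phrase) phrase) []
  String.mk phrase

-- ===== PORT B =====
-- literal port of Source B: one grid pass building buckets : Dict Int (List String), then join.
def decrypt_2_alt (encrypted_table : List (List String)) (table : List (List Int)) : String :=
  let n : Int := PySem.List.len (PySem.List.pyGetD table 0 [])
  let limit : Int := n * n
  let buckets : PySem.Dict Int (List String) :=
    (PySem.List.pyRange 0 n 1).foldl (fun d i =>
      (PySem.List.pyRange 0 n 1).foldl (fun d j =>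
        let v := PySem.List.pyGetD (PySem.List.pyGetD table i []) j 0
        if 1 ≤ v ∧ v ≤ limit then
          d.modify v [] (· ++ [PySem.List.pyGetD (PySem.List.pyGetD encrypted_table i []) j ""])
        else d) d) PySem.Dict.empty
  String.mk ((PySem.List.pyRange 1 (limit + 1) 1).foldl (fun acc v =>
    acc ++ ((buckets.getD v []).foldl (fun a s => a ++ s.toList) [])) [])

-- ===== PRECONDITION & SPEC =====
-- Pre_ excludes exactly the inputs where A raises IndexError: empty table, fewer than n rows,
-- a row of table shorter than n, or a missing encrypted_table cell at a position whose table
-- value lies in 1..n*n (the only encrypted cells A ever reads).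
def Pre_decrypt_2 (encrypted_table : List (List String)) (table : List (List Int)) : Prop :=
  table ≠ [] ∧
  (table.headD []).length ≤ table.length ∧
  ∀ i < (table.headD []).length,
    (table.headD []).length ≤ (table.getD i []).length ∧
    ∀ j < (table.headD []).length,
      (1 ≤ (table.getD i []).getD j 0 ∧
        (table.getD i []).getD j 0 ≤ ((table.headD []).length : Int) * (table.headD []).length) →
      (i < encrypted_table.length ∧ j < (encrypted_table.getD i []).length)
instance (encrypted_table : List (List String)) (table : List (List Int)) : Decidable (Pre_decrypt_2 encrypted_table table) := by unfold Pre_decrypt_2; infer_instance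

def pvWitness_decrypt_2 : List (List String) × List (List Int) :=
  ([["ab", "c"], ["d", "e"]], [[2, 1], [4, 3]])

def Spec_decrypt_2 (encrypted_table : List (List String)) (table : List (List Int)) (out : String) : Prop := out = decrypt_2_alt encrypted_table table
instance (encrypted_table : List (List String)) (table : List (List Int)) (out : String) : Decidable (Spec_decrypt_2 encrypted_table table out) := by unfold Spec_decrypt_2; infer_instance

-- ===== CLAIM (what is proved, stated in full; the proofs are below) =====
def Claim_equal_decrypt_2 : Prop := ∀ (encrypted_table : List (List String)) (table : List (List Int)), Dom_decrypt_2 encrypted_table table → Pre_decrypt_2 encrypted_table table → Spec_decrypt_2 encrypted_table table (decrypt_2 encrypted_table table)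

-- ===== LEMMAS AND PROOFS =====

-- the grid cells in scan order, as (number, encrypted cell) pairs
def pvCells (encrypted_table : List (List String)) (table : List (List Int)) (n : Int) :
    List (Int × String) :=
  (PySem.List.pyRange 0 n 1).flatMap (fun i =>
    (PySem.List.pyRange 0 n 1).map (fun j =>
      (PySem.List.pyGetD (PySem.List.pyGetD table i []) j 0,
       PySem.List.pyGetD (PySem.List.pyGetD encrypted_table i []) j "")))

-- what both programs produce for one number v: the cells numbered v, in scan order
def pvScan (L : List (Int × String)) (v : Int) : List Char :=
  (L.filter (fun p => p.1 == v)).flatMap (fun p => p.2.toList)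

lemma pvA_eq (e : List (List String)) (t : List (List Int)) :
    decrypt_2 e t =
      String.mk ((PySem.List.pyRange 1
          ((PySem.List.len (PySem.List.pyGetD t 0 [])) * (PySem.List.len (PySem.List.pyGetD t 0 [])) + 1) 1).foldl
        (fun acc v => acc ++ pvScan (pvCells e t (PySem.List.len (PySem.List.pyGetD t 0 []))) v) []) := by
  unfold decrypt_2
  simp only []
  congr 1
  apply PySem.List.foldl_congr_mem
  intro acc stop _
  have hstep : (fun (phrase : List Char) i =>
        (PySem.List.pyRange 0 (PySem.List.len (PySem.List.pyGetD t 0 [])) 1).foldl (fun phrase j =>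
          if PySem.List.pyGetD (PySem.List.pyGetD t i []) j 0 = stop then
            phrase ++ (PySem.List.pyGetD (PySem.List.pyGetD e i []) j "").toList
          else phrase) phrase) =
      (fun (phrase : List Char) i =>
        (((PySem.List.pyRange 0 (PySem.List.len (PySem.List.pyGetD t 0 [])) 1).map (fun j =>
            (PySem.List.pyGetD (PySem.List.pyGetD t i []) j 0,
             PySem.List.pyGetD (PySem.List.pyGetD e i []) j ""))).foldl
          (fun phrase p => if p.1 = stop then phrase ++ p.2.toList else phrase) phrase)) := by
    funext phrase i; rw [List.foldl_map]
  rw [hstep]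
  rw [← List.foldl_flatMap]
  rw [PySem.List.foldl_ite_eq_foldl_filter, PySem.List.foldl_append_eq_flatMap]
  unfold pvScan pvCells
  congr 2

lemma pvB_eq (e : List (List String)) (t : List (List Int)) :
    decrypt_2_alt e t =
      String.mk ((PySem.List.pyRange 1
          ((PySem.List.len (PySem.List.pyGetD t 0 [])) * (PySem.List.len (PySem.List.pyGetD t 0 [])) + 1) 1).foldl
        (fun acc v => acc ++ pvScan (pvCells e t (PySem.List.len (PySem.List.pyGetD t 0 []))) v) []) := by
  unfold decrypt_2_alt
  simp only []
  set n : Int := PySem.List.len (PySem.List.pyGetD t 0 []) with hn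
  congr 1
  apply PySem.List.foldl_congr_mem
  intro acc v hv
  congr 1
  -- the buckets dict built by the double loop is the fold over pvCells
  have hstep : (fun (d : PySem.Dict Int (List String)) i =>
        (PySem.List.pyRange 0 n 1).foldl (fun d j =>
          if 1 ≤ PySem.List.pyGetD (PySem.List.pyGetD t i []) j 0 ∧
              PySem.List.pyGetD (PySem.List.pyGetD t i []) j 0 ≤ n * n then
            (d.modify (PySem.List.pyGetD (PySem.List.pyGetD t i []) j 0) []
              (· ++ [PySem.List.pyGetD (PySem.List.pyGetD e i []) j ""]))
          else d) d) =
      (fun (d : PySem.Dict Int (List String)) i =>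
        (((PySem.List.pyRange 0 n 1).map (fun j =>
            (PySem.List.pyGetD (PySem.List.pyGetD t i []) j 0,
             PySem.List.pyGetD (PySem.List.pyGetD e i []) j ""))).foldl
          (fun d p => if 1 ≤ p.1 ∧ p.1 ≤ n * n then d.modify p.1 [] (· ++ [p.2]) else d) d)) := by
    funext d i; rw [List.foldl_map]
  rw [hstep]
  rw [← List.foldl_flatMap]
  rw [PySem.List.foldl_ite_eq_foldl_filter]
  rw [PySem.Dict.getD_foldl_modify_append]
  rw [PySem.Dict.getD_empty]
  have hv' : 1 ≤ v ∧ v < n * n + 1 := (PySem.List.mem_pyRange_one.mp hv)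
  have hfilt : ∀ (L : List (Int × String)),
      (L.filter (fun x => decide (1 ≤ x.1 ∧ x.1 ≤ n * n))).filter (fun p => p.1 == v) =
        L.filter (fun p => p.1 == v) := by
    intro L
    rw [List.filter_filter]
    apply List.filter_congr
    intro p _
    by_cases h : p.1 = v
    · simp [h]; omega
    · simp [h]
  rw [hfilt]
  simp only [List.nil_append]
  rw [List.foldl_map, PySem.List.foldl_append_eq_flatMap]
  simp [pvScan, pvCells]

-- ===== VERDICT (by name: the statement is the Claim_ definition above) =====
theorem decrypt_2_spec : Claim_equal_decrypt_2 := by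
  intro e t _ _
  unfold Spec_decrypt_2
  rw [pvA_eq, pvB_eq]
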